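-- pv_equiv track=rewrite | github.com/terror/solutions | binarysearch/length-of-longest-balanced-subsequence.py | solve
-- ===== SOURCE A (Python) =====
-- def solve(s):
--   a = b = 0
--   for ch in s:
--     if ch == '(':
--       a += 1
--     else:
--       b += not a
--       a -= not not a
--   return len(s) - (a + b)
-- ===== SOURCE B (Python) =====
-- def solve(s):
--   # prefix-sum formula: treat '(' as +1, any other char as -1;
--   # answer = 2 * (number of closers + minimum prefix sum (<= 0)).
--   deltas = [1 if ch == '(' else -1 for ch in s]
--   prefix = worst = 0
--   for d in deltas:
--     prefix += d
--     worst = min(worst, prefix)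
--   return 2 * (deltas.count(-1) + worst)
-- ===== Notes on version B (the rewrite author's own statement) =====
-- stated objective: alternative
-- what changed: Replaces A's greedy open-counter simulation (counting unmatched opens and closes and subtracting from len(s)) with a prefix-sum formula: map chars to +1/-1, take the minimum prefix sum (which may go negative, unlike A's clipped counter) and return 2*(closer count + that minimum).
import Mathlib
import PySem

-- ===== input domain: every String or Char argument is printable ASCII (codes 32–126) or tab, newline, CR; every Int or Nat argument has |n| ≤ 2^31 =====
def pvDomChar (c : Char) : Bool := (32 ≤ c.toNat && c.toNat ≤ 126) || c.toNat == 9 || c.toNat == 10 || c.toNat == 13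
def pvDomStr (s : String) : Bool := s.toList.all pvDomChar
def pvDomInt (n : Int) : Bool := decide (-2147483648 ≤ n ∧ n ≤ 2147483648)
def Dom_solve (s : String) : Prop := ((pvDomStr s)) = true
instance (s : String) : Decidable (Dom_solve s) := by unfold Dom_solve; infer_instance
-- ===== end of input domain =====

-- B replaces A's greedy open-counter simulation by a prefix-sum formula:
-- map chars to +1/-1, answer = 2 * (closer count + minimum prefix sum); same O(n) cost.

-- ===== PORT A =====
-- 'b += not a; a -= not not a': if a == 0 then b+1 else a-1 (a never goes negative).
def solveStepA (ab : Int × Int) (ch : Char) : Int × Int :=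
  if ch = '(' then (ab.1 + 1, ab.2)
  else if ab.1 = 0 then (ab.1, ab.2 + 1)
  else (ab.1 - 1, ab.2)

def solve (s : String) : Int :=
  let st := s.toList.foldl solveStepA (0, 0)
  (PySem.Str.len s : Int) - (st.1 + st.2)

-- ===== PORT B =====
def solveDelta (ch : Char) : Int := if ch = '(' then 1 else -1

-- the (prefix, worst) loop of Source B
def solveStepB (pw : Int × Int) (d : Int) : Int × Int :=
  (pw.1 + d, min pw.2 (pw.1 + d))

def solve_alt (s : String) : Int :=
  let deltas := s.toList.map solveDelta
  let pw := deltas.foldl solveStepB (0, 0)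
  2 * ((PySem.List.count deltas (-1) : Int) + pw.2)

-- ===== PRECONDITION & SPEC =====
def Spec_solve (s : String) (out : Int) : Prop := out = solve_alt s
instance (s : String) (out : Int) : Decidable (Spec_solve s out) := by unfold Spec_solve; infer_instance

-- ===== CLAIM (what is proved, stated in full; the proofs are below) =====
def Claim_equal_solve : Prop := ∀ (s : String), Dom_solve s → Spec_solve s (solve s)

-- ===== LEMMAS AND PROOFS =====

-- Simulation: if A's state is (r - m, -m) and B's prefix/worst state is (r, m)
-- with m ≤ 0 and m ≤ r, the folds stay in that correspondence.
theorem solve_sim (t : List Char) (r m : Int) (hm : m ≤ 0) (hmr : m ≤ r) :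
    t.foldl solveStepA (r - m, -m) =
      (((t.map solveDelta).foldl solveStepB (r, m)).1 -
         ((t.map solveDelta).foldl solveStepB (r, m)).2,
       -((t.map solveDelta).foldl solveStepB (r, m)).2) := by
  induction t generalizing r m with
  | nil => simp
  | cons ch t ih =>
    simp only [List.map_cons, List.foldl_cons, solveStepA, solveStepB, solveDelta]
    by_cases hch : ch = '('
    · simp only [hch, reduceIte]
      have hmin : min m (r + 1) = m := by omega
      rw [hmin, show r - m + 1 = r + 1 - m from by ring]
      exact ih (r + 1) m hm (by omega)
    · simp only [if_neg hch]
      by_cases hz : r - m = 0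
      · have hrm : r = m := by omega
        subst hrm
        simp only [if_pos (by omega : r - r = 0)]
        have hmin : min r (r + -1) = r - 1 := by omega
        rw [hmin, show r - r = r - 1 - (r - 1) from by ring,
          show -r + 1 = -(r - 1) from by ring]
        exact ih (r - 1) (r - 1) (by omega) le_rfl
      · simp only [if_neg hz]
        have hmin : min m (r + -1) = m := by omega
        rw [hmin, show r - m - 1 = r - 1 - m from by ring,
          show r + -1 = r - 1 from by ring]
        exact ih (r - 1) m hm (by omega)

-- The prefix component of B's fold is the start plus the sum of the deltas.
theorem solveStepB_fst (L : List Int) (r m : Int) :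
    (L.foldl solveStepB (r, m)).1 = r + L.sum := by
  induction L generalizing r m with
  | nil => simp
  | cons d L ih => simp [solveStepB, ih]; ring

-- length = sum of deltas + 2 * (number of -1 deltas).
theorem solve_count (t : List Char) :
    (t.length : Int) =
      (t.map solveDelta).sum + 2 * ((t.map solveDelta).count (-1) : Int) := by
  induction t with
  | nil => simp
  | cons ch t ih =>
    simp only [List.map_cons, List.sum_cons, List.count_cons, List.length_cons, solveDelta]
    by_cases hch : ch = '(' <;> simp [hch, ih] <;> ring

-- ===== VERDICT (by name: the statement is the Claim_ definition above) =====
theorem solve_spec : Claim_equal_solve := by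
  intro s _
  unfold Spec_solve solve solve_alt
  have hsim := solve_sim s.toList 0 0 le_rfl le_rfl
  simp only [sub_zero, neg_zero] at hsim
  rw [hsim]
  have hfst := solveStepB_fst (s.toList.map solveDelta) 0 0
  have hcnt := solve_count s.toList
  simp only [PySem.Str.len_eq, PySem.List.count_eq]
  omega
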